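-- pv_equiv track=rewrite | github.com/MrFedko/tasks_python | 33.py | summ_array
-- ===== SOURCE A (Python) =====
-- def summ_array(any):
--     result_min = 0
--     result_plus = 0
--     for i in any:
--         if i < 0:
--             result_min += i
--         else:
--             result_plus += i
--     return result_min, result_plus
-- ===== SOURCE B (Python) =====
-- def summ_array(any):
--     xs = list(any)
--     neg = sum(min(i, 0) for i in xs)
--     return (neg, sum(xs) - neg)
-- ===== Notes on version B (the rewrite author's own statement) =====
-- stated objective: alternative
-- what changed: Replaced A's branching accumulation over two counters by a branch-free arithmetic formulation: the negative side is the sum of min(i,0) clamps and the non-negative side is derived by subtracting it from the total sum.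
import Mathlib
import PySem

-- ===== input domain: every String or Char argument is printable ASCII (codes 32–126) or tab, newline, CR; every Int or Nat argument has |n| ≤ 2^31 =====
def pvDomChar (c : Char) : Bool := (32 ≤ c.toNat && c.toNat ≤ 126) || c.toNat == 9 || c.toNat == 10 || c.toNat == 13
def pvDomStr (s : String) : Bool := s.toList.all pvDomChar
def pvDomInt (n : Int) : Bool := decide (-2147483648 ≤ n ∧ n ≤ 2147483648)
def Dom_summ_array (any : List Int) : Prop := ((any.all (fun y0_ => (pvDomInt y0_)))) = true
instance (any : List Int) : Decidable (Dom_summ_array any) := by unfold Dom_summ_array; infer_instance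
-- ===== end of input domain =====

-- B replaces A's branching two-counter loop by a branch-free formulation: negatives via min(i,0) clamps, the non-negative side by subtraction from the total (objective: alternative).

-- ===== PORT A =====
def summ_array (any : List Int) : Int × Int :=
  any.foldl
    (fun (st : Int × Int) i =>
      if i < 0 then (st.1 + i, st.2) else (st.1, st.2 + i))
    (0, 0)

-- ===== PORT B =====
def summ_array_alt (any : List Int) : Int × Int :=
  let neg := (any.map (fun i => min i 0)).sum
  (neg, any.sum - neg)

-- ===== PRECONDITION & SPEC =====
def Spec_summ_array (any : List Int) (out : Int × Int) : Prop := out = summ_array_alt any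
instance (any : List Int) (out : Int × Int) : Decidable (Spec_summ_array any out) := by unfold Spec_summ_array; infer_instance

-- ===== CLAIM =====
def Claim_equal_summ_array : Prop := ∀ (any : List Int), Dom_summ_array any → Spec_summ_array any (summ_array any)

-- ===== LEMMAS AND PROOFS =====
theorem summ_array_foldl_shift (any : List Int) (a b : Int) :
    any.foldl (fun (st : Int × Int) i =>
      if i < 0 then (st.1 + i, st.2) else (st.1, st.2 + i)) (a, b)
    = (a + (any.map (fun i => min i 0)).sum,
       b + (any.sum - (any.map (fun i => min i 0)).sum)) := by
  induction any generalizing a b with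
  | nil => simp
  | cons x xs ih =>
      simp only [List.foldl_cons, List.map_cons, List.sum_cons]
      by_cases h : x < 0
      · have hm : min x 0 = x := by omega
        simp [h, ih, hm]; ring
      · have hm : min x 0 = 0 := by omega
        simp [h, ih, hm]; ring

-- ===== VERDICT =====
theorem summ_array_spec : Claim_equal_summ_array := by
  intro any _
  unfold Spec_summ_array summ_array summ_array_alt
  simpa using summ_array_foldl_shift any 0 0
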